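-- pv_equiv track=rewrite | github.com/bbYYJnhA/Wu-Zi-Qi | hevristika.py | vrednost_crni
-- ===== SOURCE A (Python) =====
-- ZMAGA = 10000000
--
-- CRNI = 1
--
-- BELI = 2
--
-- def vrednost_crni(vrstica):
--     vrednost = 0
--     vrstica.append(BELI)
--     prvi_konec = BELI
--     trenutni = BELI
--     trenutna_vrednost = 0
--     for el in vrstica:
--         if el == CRNI:
--             trenutni = CRNI
--             trenutna_vrednost += 1
--         elif el == 0:
--             if trenutni == CRNI:
--                 if prvi_konec == 0:
--                     if trenutna_vrednost >= 5:
--                         vrednost += ZMAGA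
--                     if trenutna_vrednost == 4:
--                         vrednost += ZMAGA // 10
--                     if trenutna_vrednost == 3:
--                         vrednost += ZMAGA // 100
--                     vrednost += 4**trenutna_vrednost
--                     trenutna_vrednost = 0
--                     trenutni = 0
--                     prvi_konec = 0
--                 else:
--                     if trenutna_vrednost >= 5:
--                         vrednost += ZMAGA
--                     vrednost += 2**trenutna_vrednost
--                     trenutna_vrednost = 0
--                     trenutni = 0
--                     prvi_konec = 0
--
--             trenutni = 0
--             prvi_konec = 0
--             trenutna_vrednost = 0
--
--         elif el == BELI:
--             if trenutni == CRNI: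
--                 if prvi_konec == 0:
--                     if trenutna_vrednost >= 5:
--                         vrednost += ZMAGA
--                     vrednost += 2**trenutna_vrednost
--                     trenutna_vrednost = 0
--                     trenutni = BELI
--                     prvi_konec = BELI
--                     if trenutna_vrednost >= 5:
--                         vrednost += ZMAGA
--                     if trenutna_vrednost == 4:
--                         vrednost += ZMAGA // 10
--                     if trenutna_vrednost == 3:
--                         vrednost += ZMAGA // 100
--             trenutni = BELI
--             prvi_konec = BELI
--             trenutna_vrednost = 0
--
--         else:
--             assert False, "Neveljaven element v tabeli"
--
--     return vrednost
-- ===== SOURCE B (Python) =====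
-- ZMAGA = 10000000
--
-- CRNI = 1
--
-- BELI = 2
--
-- def _score(L, left_open, right_open):
--     if left_open and right_open:
--         v = 4 ** L
--         if L >= 5:
--             v += ZMAGA
--         elif L == 4:
--             v += ZMAGA // 10
--         elif L == 3:
--             v += ZMAGA // 100
--         return v
--     if left_open or right_open:
--         return (ZMAGA if L >= 5 else 0) + 2 ** L
--     return 0
--
-- def vrednost_crni(vrstica):
--     vrstica.append(BELI)
--     assert all(el in (0, CRNI, BELI) for el in vrstica), "Neveljaven element v tabeli"
--     runs = []
--     left_open = False
--     L = 0
--     for el in vrstica: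
--         if el == CRNI:
--             L += 1
--         else:
--             if L > 0:
--                 runs.append((L, left_open, el == 0))
--             left_open = (el == 0)
--             L = 0
--     return sum(_score(L, lo, ro) for L, lo, ro in runs)
-- ===== Notes on version B (the rewrite author's own statement) =====
-- stated objective: simpler
-- what changed: Replaces A's four-variable state machine with duplicated inline scoring blocks by a two-phase decomposition: one pass segments the row into maximal black runs tagged with open/blocked boundary flags, then a single small scorer function is summed over the runs.
import Mathlib
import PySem

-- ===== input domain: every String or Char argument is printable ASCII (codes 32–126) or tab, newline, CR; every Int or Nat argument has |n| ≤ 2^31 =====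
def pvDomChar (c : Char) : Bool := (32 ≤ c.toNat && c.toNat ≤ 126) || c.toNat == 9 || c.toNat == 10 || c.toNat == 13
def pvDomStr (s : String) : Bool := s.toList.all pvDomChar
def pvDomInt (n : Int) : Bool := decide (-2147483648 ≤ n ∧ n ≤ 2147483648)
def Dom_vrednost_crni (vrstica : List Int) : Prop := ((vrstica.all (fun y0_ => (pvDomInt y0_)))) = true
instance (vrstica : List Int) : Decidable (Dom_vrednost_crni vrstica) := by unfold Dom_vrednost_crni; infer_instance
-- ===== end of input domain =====

-- B replaces A's inline four-variable state machine by run segmentation plus a separate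
-- scorer, for clarity; equivalence is about the RETURN value (both Pythons append BELI
-- to the caller's list, an observable mutation, preserved in Source B).

-- ===== PORT A =====
def ZMAGA : Int := 10000000

-- state = (vrednost, prvi_konec, trenutni, trenutna_vrednost)
def stepA (s : Int × Int × Int × Int) (el : Int) : Int × Int × Int × Int :=
  let (v, pk, tr, tv) := s
  if el = 1 then (v, pk, 1, tv + 1)
  else if el = 0 then
    (if tr = 1 then
      if pk = 0 then
        (v + (if tv ≥ 5 then ZMAGA else 0) + (if tv = 4 then ZMAGA / 10 else 0)
           + (if tv = 3 then ZMAGA / 100 else 0) + 4 ^ tv.toNat, 0, 0, 0)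
      else
        (v + (if tv ≥ 5 then ZMAGA else 0) + 2 ^ tv.toNat, 0, 0, 0)
    else (v, 0, 0, 0))
  else if el = 2 then
    (if tr = 1 then
      if pk = 0 then
        -- after adding 2^tv Python resets trenutna_vrednost to 0 and re-runs three ifs
        -- on the reset value; transliterated with the literal 0 they test
        (v + (if tv ≥ 5 then ZMAGA else 0) + 2 ^ tv.toNat
           + (if (0:Int) ≥ 5 then ZMAGA else 0) + (if (0:Int) = 4 then ZMAGA / 10 else 0)
           + (if (0:Int) = 3 then ZMAGA / 100 else 0), 2, 2, 0)
      else (v, 2, 2, 0)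
    else (v, 2, 2, 0))
  else s  -- Python: `assert False` (AssertionError) — excluded by Pre_

def vrednost_crni (vrstica : List Int) : Int :=
  ((vrstica ++ [2]).foldl stepA (0, 2, 2, 0)).1

-- ===== PORT B =====
def pvScore (L : Int) (lo ro : Bool) : Int :=
  if lo && ro then
    (4:Int) ^ L.toNat
      + (if L ≥ 5 then ZMAGA else if L = 4 then ZMAGA / 10 else if L = 3 then ZMAGA / 100 else 0)
  else if lo || ro then (if L ≥ 5 then ZMAGA else 0) + 2 ^ L.toNat
  else 0

-- one pass: maximal runs of 1s, tagged (length, left boundary open, right boundary open)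
def pvRuns : List Int → Bool → Int → List (Int × Bool × Bool)
  | [], _, _ => []
  | el :: rest, lo, L =>
    if el = 1 then pvRuns rest lo (L + 1)
    else if L > 0 then (L, lo, decide (el = 0)) :: pvRuns rest (decide (el = 0)) 0
    else pvRuns rest (decide (el = 0)) 0

def vrednost_crni_alt (vrstica : List Int) : Int :=
  ((pvRuns (vrstica ++ [2]) false 0).map (fun r => pvScore r.1 r.2.1 r.2.2)).sum

-- ===== PRECONDITION & SPEC =====
-- Pre_ excludes exactly the rows containing an element other than 0, 1, 2, on which
-- Python A raises AssertionError (`assert False`).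
def Pre_vrednost_crni (vrstica : List Int) : Prop :=
  ∀ x ∈ vrstica, x = 0 ∨ x = 1 ∨ x = 2
instance (vrstica : List Int) : Decidable (Pre_vrednost_crni vrstica) := by
  unfold Pre_vrednost_crni; infer_instance

def pvWitness_vrednost_crni : List Int := [1, 1, 0, 1, 2, 1, 1, 1]

def Spec_vrednost_crni (vrstica : List Int) (out : Int) : Prop := out = vrednost_crni_alt vrstica
instance (vrstica : List Int) (out : Int) : Decidable (Spec_vrednost_crni vrstica out) := by unfold Spec_vrednost_crni; infer_instance

-- ===== CLAIM (what is proved, stated in full; the proofs are below) =====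
def Claim_equal_vrednost_crni : Prop := ∀ (vrstica : List Int), Dom_vrednost_crni vrstica → Pre_vrednost_crni vrstica → Spec_vrednost_crni vrstica (vrednost_crni vrstica)

-- ===== LEMMAS AND PROOFS =====

lemma score_oo (L : Int) : pvScore L true true
    = (if 5 ≤ L then ZMAGA else 0) + (if L = 4 then ZMAGA / 10 else 0)
      + (if L = 3 then ZMAGA / 100 else 0) + 4 ^ L.toNat := by
  simp only [pvScore, Bool.and_self, if_true, ge_iff_le]
  generalize (4:Int) ^ L.toNat = p
  split_ifs <;> linarith

lemma score_ot (L : Int) : pvScore L true false = (if 5 ≤ L then ZMAGA else 0) + 2 ^ L.toNat := by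
  simp [pvScore]

lemma score_to (L : Int) : pvScore L false true = (if 5 ≤ L then ZMAGA else 0) + 2 ^ L.toNat := by
  simp [pvScore]

lemma score_bb (L : Int) : pvScore L false false = 0 := by
  simp [pvScore]

-- A's fold, started in the state that encodes "left boundary open = lo, current run = L",
-- computes v plus the score sum of the runs B collects from the rest of the row.
lemma key : ∀ (l : List Int), (∀ x ∈ l, x = 0 ∨ x = 1 ∨ x = 2) →
    ∀ (v L : Int) (lo : Bool), 0 ≤ L →
    (l.foldl stepA (v, (if lo then 0 else 2), (if 0 < L then 1 else if lo then 0 else 2), L)).1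
      = v + ((pvRuns l lo L).map (fun r => pvScore r.1 r.2.1 r.2.2)).sum := by
  intro l
  induction l with
  | nil => intro _ v L lo _; simp [pvRuns]
  | cons el rest ih =>
    intro hmem v L lo hL
    have hrest : ∀ x ∈ rest, x = 0 ∨ x = 1 ∨ x = 2 := fun x hx => hmem x (by simp [hx])
    have ih0t : ∀ (w : Int),
        (rest.foldl stepA (w, 0, 0, 0)).1
          = w + ((pvRuns rest true 0).map (fun r => pvScore r.1 r.2.1 r.2.2)).sum := by
      intro w
      have h := ih hrest w 0 true le_rfl
      simpa using h
    have ih0f : ∀ (w : Int),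
        (rest.foldl stepA (w, 2, 2, 0)).1
          = w + ((pvRuns rest false 0).map (fun r => pvScore r.1 r.2.1 r.2.2)).sum := by
      intro w
      have h := ih hrest w 0 false le_rfl
      simpa using h
    rcases hmem el (by simp) with h0 | h1 | h2
    · -- el = 0
      subst h0
      by_cases hpos : 0 < L
      · cases lo with
        | true =>
          simp only [List.foldl_cons, pvRuns, stepA, if_pos hpos]
          norm_num
          rw [ih0t, score_oo]
          ring
        | false =>
          simp only [List.foldl_cons, pvRuns, stepA, if_pos hpos]
          norm_num
          rw [ih0t, score_to]
          ring
      · have hL0 : L = 0 := by omega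
        subst hL0
        cases lo <;>
          · simp only [List.foldl_cons, pvRuns, stepA]
            norm_num
            rw [ih0t]
    · -- el = 1
      subst h1
      have h := ih hrest v (L + 1) lo (by omega)
      simp only [List.foldl_cons, pvRuns, stepA]
      norm_num
      rw [if_pos (show (0:Int) < L + 1 by omega)] at h
      exact h
    · -- el = 2
      subst h2
      by_cases hpos : 0 < L
      · cases lo with
        | true =>
          simp only [List.foldl_cons, pvRuns, stepA, if_pos hpos]
          norm_num
          rw [ih0f, score_ot]
          ring
        | false =>
          simp only [List.foldl_cons, pvRuns, stepA, if_pos hpos]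
          norm_num
          rw [ih0f, score_bb]
          ring
      · have hL0 : L = 0 := by omega
        subst hL0
        cases lo <;>
          · simp only [List.foldl_cons, pvRuns, stepA]
            norm_num
            rw [ih0f]

theorem vrednost_crni_spec : Claim_equal_vrednost_crni := by
  intro vrstica _ hpre
  unfold Spec_vrednost_crni vrednost_crni vrednost_crni_alt
  have h := key (vrstica ++ [2])
    (by intro x hx; rcases List.mem_append.1 hx with h | h
        · exact hpre x h
        · simp at h; right; right; exact h)
    0 0 false le_rfl
  simpa using h
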